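-- pv_equiv track=rewrite | github.com/dfint/changetext-py | changetext.py | smart_join
-- ===== SOURCE A (Python) =====
-- def smart_join(li):
--     def add_spaces(text):
--         add_space = False
--         for part in text:
--             part = part.strip()
--             if part:
--                 if add_space and part[0].isalnum():
--                     part = ' ' + part
--
--                 yield part
--                 if part[-1] not in set('"('):
--                     add_space = True
--
--     return ''.join(add_spaces(li))
-- ===== SOURCE B (Python) =====
-- def smart_join(li):
--     cleaned = [p.strip() for p in li if p.strip()]
--     # index of the first part that switches the (never-reset) add_space flag on;
--     # every part after it gets a leading space iff it starts alphanumeric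
--     k = next((i for i, p in enumerate(cleaned) if p[-1] not in '"('), len(cleaned))
--     return ''.join(cleaned[:k + 1]) + ''.join(
--         ' ' + p if p[0].isalnum() else p for p in cleaned[k + 1:])
-- ===== Notes on version B (the rewrite author's own statement) =====
-- stated objective: alternative
-- what changed: Replaces A's single generator loop with a mutable add_space flag by two passes: first materialize cleaned nonempty stripped parts, then exploit that the flag never resets to split the list at the first flag-setting part, joining the head verbatim and the tail with conditional leading spaces.
import Mathlib
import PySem

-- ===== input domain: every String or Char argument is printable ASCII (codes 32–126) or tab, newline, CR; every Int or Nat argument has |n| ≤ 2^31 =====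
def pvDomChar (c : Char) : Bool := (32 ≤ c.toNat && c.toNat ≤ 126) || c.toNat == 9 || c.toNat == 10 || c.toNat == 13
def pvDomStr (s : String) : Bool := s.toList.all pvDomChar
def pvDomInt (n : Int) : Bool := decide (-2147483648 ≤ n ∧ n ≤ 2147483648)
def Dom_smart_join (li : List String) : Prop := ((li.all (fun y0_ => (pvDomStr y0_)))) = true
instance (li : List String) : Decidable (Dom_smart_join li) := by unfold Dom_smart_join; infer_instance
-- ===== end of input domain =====

-- B replaces A's single generator loop carrying a mutable flag by two passes: clean the
-- parts first, then split at the first part that turns the never-reset add_space flag on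
-- and decorate only the tail (objective: alternative decomposition, same cost).

-- part[0].isalnum() on a part (shared char test of both Pythons)
def sjAlnumHead (p : List Char) : Bool := (PySem.List.pyGet? p 0).elim false PySem.Chars.isalnum
-- part[-1] not in set('"(')
def sjLastOk (p : List Char) : Bool := (PySem.List.pyGet? p (-1)).elim true (fun c => !(c == '"' || c == '('))

-- ===== PORT A =====
-- loop body of the generator add_spaces: state = (add_space, output accumulated by ''.join)
def sjA_step (st : Bool × List Char) (raw : String) : Bool × List Char :=
  let p := PySem.Chars.strip raw.toList
  if p = [] then st
  else
    let q := if st.1 && sjAlnumHead p then ' ' :: p else p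
    (if sjLastOk q then true else st.1, st.2 ++ q)

def smart_join (li : List String) : String :=
  String.mk (li.foldl sjA_step (false, [])).2

-- ===== PORT B =====
def sjB_dec (p : List Char) : List Char := if sjAlnumHead p then ' ' :: p else p

def smart_join_alt (li : List String) : String :=
  let cleaned := (li.map (fun s => PySem.Chars.strip s.toList)).filter (fun p => p ≠ [])
  let k := cleaned.findIdx sjLastOk        -- next((i …), len(cleaned)): findIdx defaults to length
  String.mk ((cleaned.take (k + 1)).flatten ++ ((cleaned.drop (k + 1)).map sjB_dec).flatten)

-- ===== PRECONDITION & SPEC =====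
def Spec_smart_join (li : List String) (out : String) : Prop := out = smart_join_alt li
instance (li : List String) (out : String) : Decidable (Spec_smart_join li out) := by unfold Spec_smart_join; infer_instance

-- ===== CLAIM (what is proved, stated in full; the proofs are below) =====
def Claim_equal_smart_join : Prop := ∀ (li : List String), Dom_smart_join li → Spec_smart_join li (smart_join li)

-- ===== LEMMAS AND PROOFS =====

-- A's step specialised to an already-cleaned (stripped, nonempty) part
def sjStepC (st : Bool × List Char) (p : List Char) : Bool × List Char :=
  let q := if st.1 && sjAlnumHead p then ' ' :: p else p
  (if sjLastOk q then true else st.1, st.2 ++ q)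

lemma sjA_fold_clean : ∀ (li : List String) (st : Bool × List Char),
    li.foldl sjA_step st
      = ((li.map (fun s => PySem.Chars.strip s.toList)).filter (fun p => p ≠ [])).foldl sjStepC st := by
  intro li
  induction li with
  | nil => intro st; rfl
  | cons s tl ih =>
    intro st
    by_cases h : PySem.Chars.strip s.toList = []
    · simp [sjA_step, h, ih]
    · simp only [List.foldl_cons, List.map_cons, List.filter_cons]
      simp [sjA_step, sjStepC, h, ih]

lemma sjFold_true : ∀ (cs : List (List Char)) (acc : List Char),
    (cs.foldl sjStepC (true, acc)).2 = acc ++ (cs.map sjB_dec).flatten := by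
  intro cs
  induction cs with
  | nil => intro acc; simp
  | cons p tl ih =>
    intro acc
    simp only [List.foldl_cons, sjStepC]
    simp [ih, sjB_dec]

lemma sjFold_false : ∀ (cs : List (List Char)) (acc : List Char),
    (cs.foldl sjStepC (false, acc)).2
      = acc ++ (cs.take (cs.findIdx sjLastOk + 1)).flatten
          ++ ((cs.drop (cs.findIdx sjLastOk + 1)).map sjB_dec).flatten := by
  intro cs
  induction cs with
  | nil => intro acc; simp
  | cons p tl ih =>
    intro acc
    by_cases h : sjLastOk p
    · simp only [List.foldl_cons, sjStepC]
      simp [h, List.findIdx_cons, sjFold_true]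
    · simp only [List.foldl_cons, sjStepC]
      simp [h, List.findIdx_cons, ih]

-- ===== VERDICT (by name: the statement is the Claim_ definition above) =====
theorem smart_join_spec : Claim_equal_smart_join := by
  intro li _
  show _ = _
  simp [smart_join, smart_join_alt, sjA_fold_clean, sjFold_false]
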